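-- pv_equiv track=rewrite | github.com/AdithyaRajagopalan24/LeetcodeAnswers | 3685-subsequence-sum-after-capping-elements/3685-subsequence-sum-after-capping-elements.py | subsequenceSumAfterCapping
-- ===== SOURCE A (Python) =====
-- from typing import List
--
-- def subsequenceSumAfterCapping(nums: List[int], cap: int) -> List[bool]:
--     nums.sort()
--     canSum = [False] * (cap + 1)
--     canSum[0] = True
--     result, idx, n = [], 0, len(nums)
--
--     for limit in range(1, n + 1):
--         while idx < n and nums[idx] <= limit:
--             for s in range(cap, nums[idx] - 1, -1):
--                 if canSum[s - nums[idx]]: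
--                     canSum[s] = True
--             idx += 1
--         result.append(any(canSum[s] for s in range(cap, max(0, cap - limit * (n - idx)) - 1, -limit)))
--
--     return result
-- ===== SOURCE B (Python) =====
-- from typing import List
--
-- def subsequenceSumAfterCapping(nums: List[int], cap: int) -> List[bool]:
--     nums.sort()  # same in-place sort side effect as the original
--     n = len(nums)
--     # earliest[s] = smallest prefix length of the sorted array whose subset sums include s
--     # (n + 1 means "no prefix reaches s"); one full 0/1 pass, done before any limit is looked at
--     earliest = [n + 1] * (cap + 1)
--     earliest[0] = 0
--     for i, num in enumerate(nums, 1):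
--         for s in range(cap, num - 1, -1):
--             if earliest[s] > i and earliest[s - num] < i:
--                 earliest[s] = i
--     result = []
--     for limit in range(1, n + 1):
--         idx = sum(1 for x in nums if x <= limit)   # elements kept uncapped under this limit
--         result.append(any(cap - m * limit >= 0 and earliest[cap - m * limit] <= idx
--                           for m in range(n - idx + 1)))
--     return result
-- ===== Notes on version B (the rewrite author's own statement) =====
-- stated objective: alternative
-- what changed: Replaces A's limit-interleaved boolean reachability DP (carried idx + while loop advancing it, per-limit downward progression scan over the boolean table) by a staged design: one upfront pass computing, per sum s, the smallest sorted-prefix length earliest[s] that can reach s, after which each limit is answered independently by counting elements <= limit and testing earliest[cap - m*limit] <= idx over the multiple counts m.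
import Mathlib
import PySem

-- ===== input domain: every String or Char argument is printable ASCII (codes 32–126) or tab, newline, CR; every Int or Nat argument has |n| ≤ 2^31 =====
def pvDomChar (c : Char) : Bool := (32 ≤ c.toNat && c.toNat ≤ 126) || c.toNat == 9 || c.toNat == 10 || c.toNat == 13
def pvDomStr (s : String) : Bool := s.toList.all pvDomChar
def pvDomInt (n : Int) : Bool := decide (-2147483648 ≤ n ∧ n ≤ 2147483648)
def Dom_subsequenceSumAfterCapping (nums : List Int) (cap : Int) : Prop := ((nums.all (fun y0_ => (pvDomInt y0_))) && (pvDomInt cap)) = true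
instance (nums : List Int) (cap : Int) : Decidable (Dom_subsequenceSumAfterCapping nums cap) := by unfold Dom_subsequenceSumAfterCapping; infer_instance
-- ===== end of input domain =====

-- B replaces A's limit-interleaved boolean DP by one upfront earliest-prefix-index DP
-- followed by an independent per-limit count-and-test pass (objective: alternative, same cost).
-- Both sort `nums` in place; equivalence here is about the return value.

-- ===== PORT A =====
-- inner loop `for s in range(cap, nums[idx]-1, -1)`: s runs down while s ≥ num;
-- the canSum[s-num] read is exact under Pre_ (0 ≤ num ≤ s, s ≤ cap)
def pvA_inner (num : Int) (cs : List Bool) (s : Int) : List Bool :=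
  if h : num ≤ s then
    pvA_inner num (if cs.getD (s - num).toNat false then cs.set s.toNat true else cs) (s - 1)
  else cs
termination_by (s - num + 1).toNat
decreasing_by omega

-- `while idx < n and nums[idx] <= limit:`
def pvA_while (nums : List Int) (limit cap : Int) (idx : Nat) (cs : List Bool) : Nat × List Bool :=
  if h : idx < nums.length then
    if nums[idx] ≤ limit then pvA_while nums limit cap (idx + 1) (pvA_inner nums[idx] cs cap)
    else (idx, cs)
  else (idx, cs)
termination_by nums.length - idx
decreasing_by omega

-- `any(canSum[s] for s in range(cap, M - 1, -limit))`; the `1 ≤ limit` guard only makes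
-- the recursion total (limit comes from range(1, n+1), so it always holds)
def pvA_any (cs : List Bool) (M limit s : Int) : Bool :=
  if h : M ≤ s ∧ 1 ≤ limit then cs.getD s.toNat false || pvA_any cs M limit (s - limit)
  else false
termination_by (s - M + 1).toNat
decreasing_by omega

-- `for limit in range(1, n + 1):` with the running (idx, canSum, result) state
def pvA_outer (nums : List Int) (cap limit : Int) (idx : Nat) (cs : List Bool) (acc : List Bool) : List Bool :=
  if h : limit ≤ (nums.length : Int) then
    let p := pvA_while nums limit cap idx cs
    pvA_outer nums cap (limit + 1) p.1 p.2
      (acc ++ [pvA_any p.2 (max 0 (cap - limit * ((nums.length : Int) - p.1))) limit cap])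
  else acc
termination_by ((nums.length : Int) + 1 - limit).toNat
decreasing_by omega

def subsequenceSumAfterCapping (nums : List Int) (cap : Int) : List Bool :=
  pvA_outer (PySem.List.sorted nums (fun x => x) false) cap 1 0
    ((List.replicate (cap + 1).toNat false).set 0 true) []

-- ===== PORT B =====
-- inner loop `for s in range(cap, num - 1, -1): if earliest[s] > i and earliest[s-num] < i: earliest[s] = i`
def pvB_inner (i num : Int) (e : List Int) (s : Int) : List Int :=
  if h : num ≤ s then
    pvB_inner i num
      (if i < e.getD s.toNat 0 ∧ e.getD (s - num).toNat 0 < i then e.set s.toNat i else e)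
      (s - 1)
  else e
termination_by (s - num + 1).toNat
decreasing_by omega

-- `for i, num in enumerate(nums, 1):` — the single upfront DP pass
def pvB_dp (cap i : Int) (l : List Int) (e : List Int) : List Int :=
  match l with
  | [] => e
  | num :: t => pvB_dp cap (i + 1) t (pvB_inner i num e cap)

-- `any(cap - m*limit >= 0 and earliest[cap - m*limit] <= idx for m in range(n - idx + 1))`
def pvB_check (e : List Int) (cap limit idx n : Int) : Bool :=
  (PySem.List.pyRange 0 (n - idx + 1) 1).any (fun m =>
    decide (0 ≤ cap - m * limit) && decide (e.getD (cap - m * limit).toNat 0 ≤ idx))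

-- `for limit in range(1, n + 1):` with `idx = sum(1 for x in nums if x <= limit)`
def pvB_limits (nums : List Int) (e : List Int) (cap limit : Int) (acc : List Bool) : List Bool :=
  if h : limit ≤ (nums.length : Int) then
    pvB_limits nums e cap (limit + 1)
      (acc ++ [pvB_check e cap limit ((nums.countP (fun x => decide (x ≤ limit)) : Nat) : Int) (nums.length : Int)])
  else acc
termination_by ((nums.length : Int) + 1 - limit).toNat
decreasing_by omega

def subsequenceSumAfterCapping_alt (nums : List Int) (cap : Int) : List Bool :=
  let sn := PySem.List.sorted nums (fun x => x) false
  pvB_limits sn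
    (pvB_dp cap 1 sn ((List.replicate (cap + 1).toNat ((sn.length : Int) + 1)).set 0 0))
    cap 1 []

-- ===== PRECONDITION & SPEC =====
-- A raises IndexError when cap < 0 (canSum[0] on an empty table) or some element of nums
-- is negative (canSum index above cap, reachable since limit ≥ 1); exactly those inputs are excluded.
def Pre_subsequenceSumAfterCapping (nums : List Int) (cap : Int) : Prop :=
  0 ≤ cap ∧ ∀ x ∈ nums, 0 ≤ x
instance (nums : List Int) (cap : Int) : Decidable (Pre_subsequenceSumAfterCapping nums cap) := by
  unfold Pre_subsequenceSumAfterCapping; infer_instance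

def pvWitness_subsequenceSumAfterCapping : List Int × Int := ([2, 1, 3], 4)

def Spec_subsequenceSumAfterCapping (nums : List Int) (cap : Int) (out : List Bool) : Prop := out = subsequenceSumAfterCapping_alt nums cap
instance (nums : List Int) (cap : Int) (out : List Bool) : Decidable (Spec_subsequenceSumAfterCapping nums cap out) := by unfold Spec_subsequenceSumAfterCapping; infer_instance

-- ===== CLAIM (what is proved, stated in full; the proofs are below) =====
def Claim_equal_subsequenceSumAfterCapping : Prop := ∀ (nums : List Int) (cap : Int), Dom_subsequenceSumAfterCapping nums cap → Pre_subsequenceSumAfterCapping nums cap → Spec_subsequenceSumAfterCapping nums cap (subsequenceSumAfterCapping nums cap)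

-- ===== LEMMAS AND PROOFS =====

theorem pvA_inner_length (num : Int) (s : Int) (cs : List Bool) :
    (pvA_inner num cs s).length = cs.length := by
  fun_induction pvA_inner with
  | case1 cs s h ih => simp only [dite_eq_ite] at ih; rw [ih]; split <;> simp
  | case2 => rfl

theorem pvA_inner_getD (num : Int) (h0 : 0 ≤ num) (s : Int) (cs : List Bool) :
    ∀ j : Nat, j < cs.length →
    (pvA_inner num cs s).getD j false =
      (cs.getD j false ||
        (decide (num ≤ (j : Int)) && decide ((j : Int) ≤ s) && cs.getD ((j : Int) - num).toNat false)) := by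
  fun_induction pvA_inner num cs s with
  | case2 cs s h =>
    intro j hj
    have : ¬ ((j:Int) ≤ s ∧ num ≤ (j:Int)) := by omega
    by_cases h1 : num ≤ (j:Int) <;> by_cases h2 : (j:Int) ≤ s <;> simp [h1, h2] <;> omega
  | case1 cs s h ih =>
    intro j hj
    simp only [dite_eq_ite] at ih
    set cs' := if cs.getD (s - num).toNat false = true then cs.set s.toNat true else cs with hcs'
    have hlen : cs'.length = cs.length := by rw [hcs']; split <;> simp
    have hne : ∀ k : Nat, k ≠ s.toNat → cs'.getD k false = cs.getD k false := by
      intro k hk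
      rw [hcs']; split
      · simp [List.getD_eq_getElem?_getD, Ne.symm hk]
      · rfl
    have ihj := ih j (by omega)
    by_cases hjs : j = s.toNat
    · have hjs' : (j:Int) = s := by omega
      have hterm : ¬ ((j:Int) ≤ s - 1) := by omega
      have hslt : s.toNat < cs.length := hjs ▸ hj
      rw [ihj]
      by_cases hget : cs.getD (s - num).toNat false = true
      · have htrue : cs'.getD j false = true := by
          rw [hcs', if_pos hget, hjs, List.getD_eq_getElem?_getD, List.getElem?_set]
          simp [hslt]
        rw [htrue]
        simp [hterm, show num ≤ (j:Int) by omega, show (j:Int) ≤ s by omega,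
          show ((j:Int) - num).toNat = (s - num).toNat by omega]
        exact Or.inr (by simpa [List.getD_eq_getElem?_getD] using hget)
      · have hc : cs' = cs := by rw [hcs', if_neg hget]
        have hsn : ((j:Int) - num).toNat = (s - num).toNat := by omega
        rw [hc]
        simp only [hterm, hsn, hget]
        simp [show (j:Int) ≤ s by omega]
    · have hjs'' : (j:Int) ≠ s := by omega
      rw [ihj, hne j hjs]
      by_cases h1 : num ≤ (j:Int)
      · by_cases h2 : (j:Int) ≤ s
        · have h2' : (j:Int) ≤ s - 1 := by omega
          have hr : ((j:Int) - num).toNat ≠ s.toNat := by omega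
          rw [hne _ hr]
          simp [h1, h2, h2']
        · simp [h1, h2]
          intro hlt
          exact absurd hlt (by omega)
      · simp [h1]

theorem pvA_any_true (cs : List Bool) (M limit : Int) (hl : 1 ≤ limit) :
    ∀ s : Int, pvA_any cs M limit s = true ↔
      ∃ k : Nat, M ≤ s - (k : Int) * limit ∧ cs.getD (s - (k : Int) * limit).toNat false = true := by
  intro s
  induction hf : (s - M + 1).toNat using Nat.strong_induction_on generalizing s with
  | _ f ih =>
  rw [pvA_any]
  by_cases h1 : M ≤ s
  · simp only [h1, hl, and_self, dif_pos, Bool.or_eq_true]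
    rw [ih ((s - limit) - M + 1).toNat (by omega) (s - limit) rfl]
    constructor
    · rintro (h | ⟨k, hk1, hk2⟩)
      · exact ⟨0, by simpa using h1, by simpa using h⟩
      · have he : s - ((k:Int) + 1) * limit = (s - limit) - (k:Int) * limit := by ring
        exact ⟨k + 1, by rw [Nat.cast_add, Nat.cast_one, he]; exact hk1,
          by rw [Nat.cast_add, Nat.cast_one, he]; exact hk2⟩
    · rintro ⟨k, hk1, hk2⟩
      cases k with
      | zero => exact Or.inl (by simpa using hk2)
      | succ k =>
        have he : s - ((k:Int) + 1) * limit = (s - limit) - (k:Int) * limit := by ring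
        rw [Nat.cast_add, Nat.cast_one, he] at hk1 hk2
        exact Or.inr ⟨k, hk1, hk2⟩
  · have h2 : ¬ (M ≤ s ∧ 1 ≤ limit) := by tauto
    simp only [h2, dif_neg, not_false_iff]
    constructor
    · intro h; exact absurd h (by simp)
    rintro ⟨k, hk1, hk2⟩
    exfalso
    have : 0 ≤ (k : Int) * limit := by positivity
    omega

theorem pvB_inner_length (i num : Int) (e : List Int) (s : Int) :
    (pvB_inner i num e s).length = e.length := by
  fun_induction pvB_inner with
  | case1 e s h ih => simp only [dite_eq_ite] at ih; rw [ih]; split <;> simp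
  | case2 => rfl

theorem pvB_inner_getD (i num : Int) (h0 : 0 ≤ num) (s : Int) (e : List Int) :
    ∀ j : Nat, j < e.length →
    (pvB_inner i num e s).getD j 0 =
      if num ≤ (j : Int) ∧ (j : Int) ≤ s ∧ i < e.getD j 0 ∧ e.getD ((j : Int) - num).toNat 0 < i
      then i else e.getD j 0 := by
  fun_induction pvB_inner i num e s with
  | case2 e s h =>
    intro j hj
    rw [if_neg]
    rintro ⟨ha, hb, -, -⟩
    omega
  | case1 e s h ih =>
    intro j hj
    simp only [dite_eq_ite] at ih
    set e' := if i < e.getD s.toNat 0 ∧ e.getD (s - num).toNat 0 < i then e.set s.toNat i else e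
      with he'
    have hlen : e'.length = e.length := by rw [he']; split <;> simp
    have hne : ∀ k : Nat, k ≠ s.toNat → e'.getD k 0 = e.getD k 0 := by
      intro k hk
      rw [he']; split
      · simp [List.getD_eq_getElem?_getD, Ne.symm hk]
      · rfl
    have ihj := ih j (by omega)
    by_cases hjs : j = s.toNat
    · have hjs' : (j:Int) = s := by omega
      have hterm : ¬ ((j:Int) ≤ s - 1) := by omega
      have hslt : s.toNat < e.length := hjs ▸ hj
      rw [ihj, if_neg (fun hx => hterm hx.2.1)]
      by_cases hcond : i < e.getD s.toNat 0 ∧ e.getD (s - num).toNat 0 < i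
      · have hset : e'.getD j 0 = i := by
          rw [he', if_pos hcond, hjs, List.getD_eq_getElem?_getD, List.getElem?_set]
          simp [hslt]
        rw [hset, if_pos]
        exact ⟨by omega, by omega, by rw [hjs]; exact hcond.1,
          by rw [show ((j:Int) - num).toNat = (s - num).toNat from by omega]; exact hcond.2⟩
      · have hc : e' = e := by rw [he', if_neg hcond]
        rw [hc, if_neg]
        rintro ⟨-, -, hx1, hx2⟩
        apply hcond
        refine ⟨by rw [← hjs]; exact hx1, ?_⟩
        rw [show (s - num).toNat = ((j:Int) - num).toNat from by omega]
        exact hx2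
    · have hjs'' : (j:Int) ≠ s := by omega
      rw [ihj, hne j hjs]
      by_cases h2 : (j:Int) ≤ s - 1
      · have hr : ((j:Int) - num).toNat ≠ s.toNat := by omega
        rw [hne _ hr]
        split_ifs with hA hB hB
        · rfl
        · exact absurd ⟨hA.1, by omega, hA.2.2⟩ hB
        · exact absurd ⟨hB.1, by omega, hB.2.2⟩ hA
        · rfl
      · have h3 : ¬ ((j:Int) ≤ s) := by omega
        rw [if_neg (fun hx => h2 hx.2.1), if_neg (fun hx => h3 hx.2.1)]

-- the invariant tying A's boolean table after i elements to B's earliest-index table: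
-- equal lengths, cs[j] ↔ e[j] ≤ i, and every e entry is either ≤ i or the sentinel n+1
def pvInv (n cap : Int) (i : Int) (cs : List Bool) (e : List Int) : Prop :=
  cs.length = (cap + 1).toNat ∧ e.length = (cap + 1).toNat ∧
  ∀ j : Nat, (j : Int) ≤ cap →
    ((cs.getD j false = true ↔ e.getD j 0 ≤ i) ∧ (e.getD j 0 ≤ i ∨ e.getD j 0 = n + 1))

theorem pvInv_init (n cap : Int) (hc : 0 ≤ cap) (hn : 0 ≤ n) :
    pvInv n cap 0 ((List.replicate (cap + 1).toNat false).set 0 true)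
      ((List.replicate (cap + 1).toNat (n + 1)).set 0 0) := by
  refine ⟨by simp, by simp, ?_⟩
  intro j hj
  have hlt : j < (cap + 1).toNat := by omega
  by_cases hz : j = 0
  · subst hz
    simp [List.getD_eq_getElem?_getD, hlt]
  · simp [List.getD_eq_getElem?_getD, hlt, Ne.symm hz]
    omega

theorem pvInv_step (n cap num i : Int) (hnum : 0 ≤ num) (hi : 0 ≤ i) (hin : i < n)
    (cs : List Bool) (e : List Int) (h : pvInv n cap i cs e) :
    pvInv n cap (i + 1) (pvA_inner num cs cap) (pvB_inner (i + 1) num e cap) := by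
  obtain ⟨hlcs, hle, hcor⟩ := h
  refine ⟨(pvA_inner_length num cap cs).trans hlcs,
    (pvB_inner_length (i+1) num e cap).trans hle, ?_⟩
  intro j hj
  have hjcs : j < cs.length := by omega
  have hje : j < e.length := by omega
  rw [pvA_inner_getD num hnum cap cs j hjcs, pvB_inner_getD (i+1) num hnum cap e j hje]
  obtain ⟨hc1, hc2⟩ := hcor j hj
  by_cases h1 : num ≤ (j : Int)
  · have h2 : (j : Int) ≤ cap := hj
    have hjn' : (((((j:Int) - num).toNat) : Int)) ≤ cap := by omega
    obtain ⟨hd1, hd2⟩ := hcor (((j:Int) - num).toNat) hjn'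
    by_cases hcs : cs.getD j false = true
    · have hnlt : ¬ (i + 1 < e.getD j 0) := by have := hc1.mp hcs; omega
      rw [if_neg (fun hx => hnlt hx.2.2.1)]
      refine ⟨?_, ?_⟩
      · constructor
        · intro _; have := hc1.mp hcs; omega
        · intro _
          simp only [Bool.or_eq_true]
          exact Or.inl hcs
      · left; have := hc1.mp hcs; omega
    · by_cases hsn : cs.getD ((j:Int) - num).toNat false = true
      · have hlt : i + 1 < e.getD j 0 := by
          rw [hc1] at hcs
          rcases hc2 with hh | hh
          · exact absurd hh hcs
          · omega
        have hlt2 : e.getD ((j:Int) - num).toNat 0 < i + 1 := by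
          have := hd1.mp hsn; omega
        rw [if_pos ⟨h1, h2, hlt, hlt2⟩]
        refine ⟨?_, Or.inl le_rfl⟩
        constructor
        · intro _; exact le_rfl
        · intro _
          simp only [Bool.or_eq_true, Bool.and_eq_true, decide_eq_true_eq]
          exact Or.inr ⟨⟨h1, h2⟩, hsn⟩
      · have hen : e.getD j 0 = n + 1 := by
          rcases hc2 with hh | hh
          · exact absurd (hc1.mpr hh) hcs
          · exact hh
        rw [if_neg]
        · refine ⟨?_, ?_⟩
          · rw [hen]
            simp only [Bool.or_eq_true, Bool.and_eq_true, decide_eq_true_eq]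
            constructor
            · rintro (hh | hh)
              · exact absurd hh hcs
              · exact absurd hh.2 hsn
            · intro hh
              exact absurd hh (by omega)
          · right; exact hen
        · rintro ⟨-, -, -, hlt⟩
          exact hsn (hd1.mpr (by omega))
  · rw [if_neg (fun hx => h1 hx.1)]
    simp only [h1, decide_false, Bool.false_and, Bool.or_false]
    refine ⟨?_, ?_⟩
    · constructor
      · intro hcs; have := hc1.mp hcs; omega
      · intro hle'
        apply hc1.mpr
        rcases hc2 with hh | hh
        · exact hh
        · omega
    · rcases hc2 with hh | hh
      · left; omega
      · right; exact hh

-- pvB_dp over l ++ l2 splits at the boundary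
theorem pvB_dp_append (cap : Int) (l1 l2 : List Int) :
    ∀ (i : Int) (e : List Int),
      pvB_dp cap i (l1 ++ l2) e = pvB_dp cap (i + l1.length) l2 (pvB_dp cap i l1 e) := by
  induction l1 with
  | nil => intro i e; simp [pvB_dp]
  | cons x t ih =>
    intro i e
    simp only [List.cons_append, pvB_dp, ih, List.length_cons]
    congr 1
    push_cast
    ring

-- the invariant propagates along a prefix of nonnegative elements
theorem pvInv_fold (n cap : Int) (hc : 0 ≤ cap) :
    ∀ (l : List Int) (i : Int) (cs : List Bool) (e : List Int),
      (∀ x ∈ l, 0 ≤ x) → 0 ≤ i → i + l.length ≤ n → pvInv n cap i cs e →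
      pvInv n cap (i + l.length) (l.foldl (fun c x => pvA_inner x c cap) cs)
        (pvB_dp cap (i + 1) l e) := by
  intro l
  induction l with
  | nil => intro i cs e _ _ _ h; simpa [pvB_dp] using h
  | cons x t ih =>
    intro i cs e hnn hi hlen h
    have hstep := pvInv_step n cap x i (hnn x (by simp)) hi
      (by simp at hlen; omega) cs e h
    have := ih (i + 1) (pvA_inner x cs cap) (pvB_inner (i + 1) x e cap)
      (fun y hy => hnn y (by simp [hy])) (by omega) (by simp at hlen ⊢; omega) hstep
    simpa [pvB_dp, List.foldl_cons, show i + 1 + (t.length : Int) = i + ((x :: t).length : Int) by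
      simp; ring] using this

-- entries ≤ t0 of the e-table are frozen by later DP steps (they only set sentinels to larger i)
theorem pvB_dp_frozen (n cap : Int) (hc : 0 ≤ cap) :
    ∀ (l : List Int) (i : Int) (cs : List Bool) (e : List Int),
      (∀ x ∈ l, 0 ≤ x) → 0 ≤ i → i + l.length ≤ n → pvInv n cap i cs e →
      ∀ (j : Nat), (j : Int) ≤ cap → ∀ t0 : Int, t0 ≤ i →
        ((pvB_dp cap (i + 1) l e).getD j 0 ≤ t0 ↔ e.getD j 0 ≤ t0) := by
  intro l
  induction l with
  | nil => intro i cs e _ _ _ _ j hj t0 _; simp [pvB_dp]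
  | cons x t ih =>
    intro i cs e hnn hi hlen h j hj t0 ht0
    obtain ⟨hlcs, hle, hcor⟩ := h
    have hstep := pvInv_step n cap x i (hnn x (by simp)) hi (by simp at hlen; omega) cs e
      ⟨hlcs, hle, hcor⟩
    have hrec := ih (i + 1) (pvA_inner x cs cap) (pvB_inner (i + 1) x e cap)
      (fun y hy => hnn y (by simp [hy])) (by omega) (by simp at hlen ⊢; omega) hstep
      j hj t0 (by omega)
    have hje : j < e.length := by omega
    have hone : (pvB_inner (i + 1) x e cap).getD j 0 ≤ t0 ↔ e.getD j 0 ≤ t0 := by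
      rw [pvB_inner_getD (i + 1) x (hnn x (by simp)) cap e j hje]
      split
      · constructor
        · intro hle'; omega
        · intro hle'
          rename_i hcond
          omega
      · exact Iff.rfl
    simpa [pvB_dp, hone] using hrec.trans hone

-- A's fold over a prefix, as carried by the outer loop
def pvAfold (cap : Int) (l : List Int) (cs : List Bool) : List Bool :=
  l.foldl (fun c x => pvA_inner x c cap) cs

-- the while loop ends at countP (≤ limit) and wraps exactly the next elements into the fold
theorem pvA_while_spec (nums : List Int) (limit cap : Int)
    (hs : nums.Pairwise (· ≤ ·)) (cs0 : List Bool) :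
    ∀ (idx : Nat), idx ≤ nums.length →
      (∀ j (hl2 : j < nums.length), j < idx → nums[j] ≤ limit) →
      pvA_while nums limit cap idx (pvAfold cap (nums.take idx) cs0) =
        (nums.countP (fun x => decide (x ≤ limit)),
         pvAfold cap (nums.take (nums.countP (fun x => decide (x ≤ limit)))) cs0) ∧
      nums.countP (fun x => decide (x ≤ limit)) ≤ nums.length ∧
      (∀ j (hl2 : j < nums.length),
        j < nums.countP (fun x => decide (x ≤ limit)) → nums[j] ≤ limit) := by
  have hpg := (List.pairwise_iff_getElem).1 hs
  intro idx
  induction hf : nums.length - idx using Nat.strong_induction_on generalizing idx with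
  | _ f ih =>
  intro hidx hpre
  rw [pvA_while]
  by_cases h1 : idx < nums.length
  · by_cases h2 : nums[idx] ≤ limit
    · rw [dif_pos h1, if_pos h2]
      have htk : nums.take (idx + 1) = nums.take idx ++ [nums[idx]] := by
        rw [List.take_add_one, List.getElem?_eq_getElem h1]; rfl
      have hfold : pvA_inner nums[idx] (pvAfold cap (nums.take idx) cs0) cap =
          pvAfold cap (nums.take (idx + 1)) cs0 := by
        rw [htk]
        simp only [pvAfold, List.foldl_append, List.foldl_cons, List.foldl_nil]
      rw [hfold]
      exact ih (nums.length - (idx + 1)) (by omega) (idx + 1) rfl (by omega)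
        (fun j hjlen hj => by
          by_cases hji : j < idx
          · exact hpre j hjlen hji
          · have : j = idx := by omega
            subst this; exact h2)
    · rw [dif_pos h1, if_neg h2]
      have h3 : (nums.take idx).countP (fun x => decide (x ≤ limit)) =
          (nums.take idx).length := by
        rw [List.countP_eq_length]
        intro x hx
        obtain ⟨j, hj, rfl⟩ := List.getElem_of_mem hx
        have hj2 : j < idx := by simp at hj; omega
        rw [List.getElem_take]
        simpa using hpre j (by omega) hj2
      have h4 : (nums.drop idx).countP (fun x => decide (x ≤ limit)) = 0 := by
        rw [List.countP_eq_zero]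
        intro x hx
        obtain ⟨j, hj, rfl⟩ := List.getElem_of_mem hx
        have hj2 : j < nums.length - idx := by simpa using hj
        rw [List.getElem_drop]
        have hle : nums[idx] ≤ nums[idx + j]'(by omega) := by
          rcases Nat.eq_zero_or_pos j with hz | hz
          · subst hz; simp
          · exact hpg idx (idx + j) (by omega) (by omega) (by omega)
        simp
        omega
      have hcnt : nums.countP (fun x => decide (x ≤ limit)) = idx := by
        conv_lhs => rw [← List.take_append_drop idx nums]
        rw [List.countP_append, h3, h4, List.length_take]
        omega
      rw [hcnt]
      exact ⟨rfl, by omega, fun j hjlen hj => hpre j hjlen (by omega)⟩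
  · rw [dif_neg h1]
    have hidx' : idx = nums.length := by omega
    have hcnt : nums.countP (fun x => decide (x ≤ limit)) = nums.length := by
      rw [List.countP_eq_length]
      intro x hx
      obtain ⟨j, hj, rfl⟩ := List.getElem_of_mem hx
      simpa using hpre j (by omega) (by omega)
    subst hidx'
    refine ⟨?_, by omega, fun j hjlen hj => hpre j hjlen (by omega)⟩
    rw [hcnt]

-- equality of the two per-limit tests, given the table correspondence at threshold idx
theorem pvCheck_eq (cs : List Bool) (e : List Int) (cap limit : Int) (idx n : Nat)
    (hc : 0 ≤ cap) (hl : 1 ≤ limit) (hidx : idx ≤ n) (hlcs : cs.length = (cap + 1).toNat)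
    (hcor : ∀ j : Nat, (j : Int) ≤ cap → (e.getD j 0 ≤ (idx : Int) ↔ cs.getD j false = true)) :
    pvA_any cs (max 0 (cap - limit * ((n : Int) - (idx : Int)))) limit cap =
      pvB_check e cap limit (idx : Int) (n : Int) := by
  apply Bool.eq_iff_iff.mpr
  rw [pvA_any_true cs _ limit hl cap]
  unfold pvB_check
  rw [List.any_eq_true]
  constructor
  · rintro ⟨k, hk1, hk2⟩
    have hknn : (0:Int) ≤ (k:Int) * limit := by positivity
    have hv0 : 0 ≤ cap - (k:Int) * limit := le_trans (le_max_left _ _) hk1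
    have hv2 : cap - limit * ((n:Int) - idx) ≤ cap - (k:Int) * limit :=
      le_trans (le_max_right _ _) hk1
    have hkr : (k:Int) ≤ (n:Int) - idx := by nlinarith
    refine ⟨(k : Int), ?_, ?_⟩
    · rw [PySem.List.mem_pyRange_one]; omega
    · simp only [Bool.and_eq_true, decide_eq_true_eq]
      exact ⟨hv0, (hcor (cap - (k:Int) * limit).toNat (by omega)).mpr hk2⟩
  · rintro ⟨m, hm, hp⟩
    rw [PySem.List.mem_pyRange_one] at hm
    simp only [Bool.and_eq_true, decide_eq_true_eq] at hp
    obtain ⟨hp0, hpe⟩ := hp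
    have hmnn : (0:Int) ≤ m * limit := by
      have : (0:Int) ≤ m := hm.1
      positivity
    have hcs := (hcor (cap - m * limit).toNat (by omega)).mp hpe
    refine ⟨m.toNat, ?_, ?_⟩
    · rw [show ((m.toNat : Int)) = m from by omega]
      refine max_le hp0 ?_
      have : m * limit ≤ ((n:Int) - idx) * limit :=
        mul_le_mul_of_nonneg_right (by omega) (by omega)
      nlinarith
    · rw [show ((m.toNat : Int)) = m from by omega]
      exact hcs

-- outer loops: A's carried (idx, cs) state versus B's stateless per-limit recomputation
theorem pvOuter_eq (nums : List Int) (cap : Int) (hc : 0 ≤ cap)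
    (hs : nums.Pairwise (· ≤ ·)) (hnn : ∀ x ∈ nums, 0 ≤ x)
    (cs0 : List Bool) (e0 : List Int)
    (hinit : pvInv (nums.length : Int) cap 0 cs0 e0) :
    ∀ (limit : Int) (idx : Nat) (acc : List Bool),
      1 ≤ limit → idx ≤ nums.length →
      (∀ j (hl2 : j < nums.length), j < idx → nums[j] ≤ limit) →
      pvA_outer nums cap limit idx (pvAfold cap (nums.take idx) cs0) acc =
        pvB_limits nums (pvB_dp cap 1 nums e0) cap limit acc := by
  intro limit
  induction hf : ((nums.length : Int) + 1 - limit).toNat using Nat.strong_induction_on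
    generalizing limit with
  | _ f ih =>
  intro idx acc hl hidx hpre
  rw [pvA_outer, pvB_limits]
  by_cases h1 : limit ≤ (nums.length : Int)
  · rw [dif_pos h1, dif_pos h1]
    obtain ⟨hwhile, hcle, hcpre⟩ := pvA_while_spec nums limit cap hs cs0 idx hidx hpre
    set c := nums.countP (fun x => decide (x ≤ limit)) with hcdef
    -- invariant at prefix length c
    have hsplit : nums = nums.take c ++ nums.drop c := (List.take_append_drop c nums).symm
    have hlentake : (nums.take c).length = c := by simp; omega
    have hinv_c : pvInv (nums.length : Int) cap (c : Int)
        (pvAfold cap (nums.take c) cs0) (pvB_dp cap 1 (nums.take c) e0) := by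
      have := pvInv_fold (nums.length : Int) cap hc (nums.take c) 0 cs0 e0
        (fun x hx => hnn x (List.mem_of_mem_take hx)) le_rfl
        (by rw [hlentake]; omega) hinit
      simpa [pvAfold, hlentake] using this
    -- final e at threshold c agrees with cs at prefix c
    have hefinal : pvB_dp cap 1 nums e0 =
        pvB_dp cap (1 + (nums.take c).length) (nums.drop c) (pvB_dp cap 1 (nums.take c) e0) := by
      conv_lhs => rw [hsplit]
      exact pvB_dp_append cap (nums.take c) (nums.drop c) 1 e0
    obtain ⟨hlcs, hle, hcor⟩ := hinv_c
    have hfroz := pvB_dp_frozen (nums.length : Int) cap hc (nums.drop c) (c : Int)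
      (pvAfold cap (nums.take c) cs0) (pvB_dp cap 1 (nums.take c) e0)
      (fun x hx => hnn x (List.mem_of_mem_drop hx)) (by omega)
      (by simp; omega) ⟨hlcs, hle, hcor⟩
    have hcorr : ∀ j : Nat, (j : Int) ≤ cap →
        ((pvB_dp cap 1 nums e0).getD j 0 ≤ (c : Int) ↔
          (pvAfold cap (nums.take c) cs0).getD j false = true) := by
      intro j hj
      rw [hefinal, show (1 : Int) + (nums.take c).length = (c : Int) + 1 by rw [hlentake]; ring]
      rw [hfroz j hj (c : Int) le_rfl]
      exact (hcor j hj).1.symm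
    have hcheck := pvCheck_eq (pvAfold cap (nums.take c) cs0) (pvB_dp cap 1 nums e0)
      cap limit c nums.length hc hl hcle hlcs hcorr
    simp only [hwhile]
    rw [hcheck]
    exact ih (((nums.length : Int) + 1 - (limit + 1)).toNat) (by omega) (limit + 1) rfl
      c _ (by omega) hcle (fun j hjlen hj => le_trans (hcpre j hjlen hj) (by omega))
  · rw [dif_neg h1, dif_neg h1]

-- ===== VERDICT (by name: the statement is the Claim_ definition above) =====
theorem subsequenceSumAfterCapping_spec : Claim_equal_subsequenceSumAfterCapping := by
  intro nums cap _ hpre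
  unfold Spec_subsequenceSumAfterCapping subsequenceSumAfterCapping subsequenceSumAfterCapping_alt
  have hs := PySem.List.sorted_pairwise nums (fun x => x) (κ := Int)
  have hnn : ∀ x ∈ PySem.List.sorted nums (fun x => x) false, 0 ≤ x :=
    fun x hx => hpre.2 x ((PySem.List.mem_sorted nums (fun x => x) false x).1 hx)
  have := pvOuter_eq (PySem.List.sorted nums (fun x => x) false) cap hpre.1 hs hnn
    ((List.replicate (cap + 1).toNat false).set 0 true)
    ((List.replicate (cap + 1).toNat (((PySem.List.sorted nums (fun x => x) false).length : Int) + 1)).set 0 0)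
    (pvInv_init _ cap hpre.1 (by positivity)) 1 0 [] le_rfl (Nat.zero_le _)
    (fun j hjlen hj => absurd hj (by omega))
  simpa [pvAfold] using this
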